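-- pv_equiv track=rewrite | github.com/catkin/catkin_tools | catkin_tools/argument_parsing.py | _extract_cmake_and_make_arguments
-- ===== SOURCE A (Python) =====
-- def split_arguments(args, splitter_name=None, splitter_index=None):
--     """Split list of args into (other, split_args, other) between splitter_name/index and `--`
--
--     :param args: list of all arguments
--     :type args: list of str
--     :param splitter_name: optional argument used to split out specific args
--     :type splitter_name: str
--     :param splitter_index: specific index at which to split
--     :type splitter_index: int
--
--     :returns: tuple (other, split_args)
--     """
--
--     if splitter_index is None:
--         if splitter_name not in args:
--             return args, []
--         splitter_index = args.index(splitter_name)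
--
--     start_index = splitter_index + 1
--     end_index = args.index('--', start_index) if '--' in args[start_index:] else None
--
--     if end_index:
--         return (
--             args[0:splitter_index],
--             args[start_index:end_index],
--             args[(end_index + 1):]
--         )
--     else:
--         return (
--             args[0:splitter_index],
--             args[start_index:],
--             []
--         )
--
-- def _extract_cmake_and_make_arguments(args, extract_catkin_make):
--     """Extract arguments which are meant to be passed to CMake and GNU Make
--     through the catkin_tools command line interface.
--
--     :param args: system arguments from which special arguments need to be extracted
--     :type args: list
--     :returns: tuple of separate args, cmake_args, make args, and catkin make args
--     :rtype: tuple
--     """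
--
--     cmake_args = []
--     make_args = []
--     catkin_make_args = []
--
--     arg_types = {}
--
--     if '--no-cmake-args' not in args:
--         arg_types['--cmake-args'] = cmake_args
--     if '--no-make-args' not in args:
--         arg_types['--make-args'] = make_args
--     if '--no-catkin_make_args' not in args and extract_catkin_make:
--         arg_types['--catkin-make-args'] = catkin_make_args
--
--     # Get the splitter indexes for each type (multiples allowed) starting at the end
--     ordered_splitters = reversed([
--         (i, t)
--         for i, t in enumerate(args)
--         if t in arg_types
--     ])
--     # Extract explicit specific args
--     head_args = args
--     tail_args = []
--     for index, name in ordered_splitters: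
--         # Update whole args list, get specific args
--         head_args, specific, tail = split_arguments(head_args, splitter_index=index)
--         tail_args.extend(tail)
--         arg_types[name][0:0] = specific
--
--     args = head_args + tail_args
--
--     # classify -D* and -G* arguments as cmake specific arguments
--     if '--cmake-args' in arg_types:
--         implicit_cmake_args = [a for a in args if a.startswith('-D') or a.startswith('-G')]
--         args = [a for a in args if a not in implicit_cmake_args]
--         cmake_args = implicit_cmake_args + cmake_args
--
--     if '--no-cmake-args' not in args and len(cmake_args) == 0:
--         cmake_args = None
--     if '--no-make-args' not in args and len(make_args) == 0:
--         make_args = None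
--     if '--no-catkin-make-args' not in args and len(catkin_make_args) == 0 and extract_catkin_make:
--         catkin_make_args = None
--
--     return args, cmake_args, make_args, catkin_make_args
-- ===== SOURCE B (Python) =====
-- def _extract_cmake_and_make_arguments(args, extract_catkin_make):
--     """Single forward scan with a destination bucket instead of reversed
--     repeated index/slice splitting."""
--     cmake_args = []
--     make_args = []
--     catkin_make_args = []
--
--     buckets = {}
--     if '--no-cmake-args' not in args:
--         buckets['--cmake-args'] = cmake_args
--     if '--no-make-args' not in args:
--         buckets['--make-args'] = make_args
--     if '--no-catkin_make_args' not in args and extract_catkin_make: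
--         buckets['--catkin-make-args'] = catkin_make_args
--
--     head = []
--     tail_blocks = []  # post-'--' remainders; later windows' blocks kept first
--     dest = head
--     in_window = False
--     for tok in args:
--         if tok in buckets:
--             dest = buckets[tok]
--             in_window = True
--         elif tok == '--' and in_window:
--             block = []
--             tail_blocks.insert(0, block)
--             dest = block
--             in_window = False
--         else:
--             dest.append(tok)
--     args = head + [t for block in tail_blocks for t in block]
--
--     if '--cmake-args' in buckets:
--         keep = []
--         implicit = []
--         for a in args:
--             (implicit if a.startswith('-D') or a.startswith('-G') else keep).append(a)
--         args = keep
--         cmake_args = implicit + cmake_args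
--
--     if '--no-cmake-args' not in args and not cmake_args:
--         cmake_args = None
--     if '--no-make-args' not in args and not make_args:
--         make_args = None
--     if '--no-catkin-make-args' not in args and not catkin_make_args and extract_catkin_make:
--         catkin_make_args = None
--
--     return args, cmake_args, make_args, catkin_make_args
-- ===== Notes on version B (the rewrite author's own statement) =====
-- stated objective: simpler
-- what changed: A repeatedly re-splits the argument list from the last splitter backwards via enumerate/reversed/index/slicing; B makes a single forward pass that routes each token to a current destination bucket (surviving head, a splitter's bucket, or the current post-'--' tail block) and concatenates the tail blocks afterwards, then does the same -D*/-G* reclassification and None-defaulting.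
import Mathlib
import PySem

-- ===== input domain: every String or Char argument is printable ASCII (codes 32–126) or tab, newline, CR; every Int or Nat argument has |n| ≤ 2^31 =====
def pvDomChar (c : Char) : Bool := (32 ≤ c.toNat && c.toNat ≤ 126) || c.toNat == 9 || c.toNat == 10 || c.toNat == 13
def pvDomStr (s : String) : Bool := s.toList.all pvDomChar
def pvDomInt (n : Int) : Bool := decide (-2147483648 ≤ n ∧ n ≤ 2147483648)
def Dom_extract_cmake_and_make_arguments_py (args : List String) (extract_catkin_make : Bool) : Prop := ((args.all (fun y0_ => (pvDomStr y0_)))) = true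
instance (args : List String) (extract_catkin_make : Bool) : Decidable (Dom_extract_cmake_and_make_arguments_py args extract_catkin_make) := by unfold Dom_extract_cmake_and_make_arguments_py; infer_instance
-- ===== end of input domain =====

-- B replaces A's reversed repeated index/slice splitting with a single forward scan that routes
-- each token to a current destination bucket (objective: simpler one-pass decomposition).

-- ===== PORT A =====
-- 't in arg_types': the dict arg_types maps a splitter name to the (aliased) bucket list; its
-- key set is determined by the three membership flags, modeled here as hc/hm/hk.
def pvActive (hc hm hk : Bool) (t : String) : Bool :=
  (hc && (t == "--cmake-args")) || (hm && (t == "--make-args")) || (hk && (t == "--catkin-make-args"))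

-- split_arguments(args, splitter_index=i), the only way A calls it (i ≥ 0 always: it is an
-- enumerate index).  "'--' in args[start:]" / "args.index('--', start)" are fused into one
-- match on the first occurrence of '--' in args[start:] (exact for start ≥ 0).
def split_arguments_py (args : List String) (splitter_index : Int) :
    List String × List String × List String :=
  let start_index := splitter_index + 1
  let rest := PySem.List.slice args (some start_index) none
  match PySem.List.index? rest "--" with
  | some j =>
    let end_index : Int := start_index + (j : Int)
    if end_index ≠ 0 then    -- Python truthiness 'if end_index:'
      (PySem.List.slice args (some 0) (some splitter_index),
       PySem.List.slice args (some start_index) (some end_index),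
       PySem.List.slice args (some (end_index + 1)) none)
    else
      (PySem.List.slice args (some 0) (some splitter_index), rest, ([] : List String))
  | none => (PySem.List.slice args (some 0) (some splitter_index), rest, ([] : List String))

-- 'arg_types[name][0:0] = specific': prepend to the bucket named name
def pvPrepend (name : String) (specific : List String)
    (b : List String × List String × List String) : List String × List String × List String :=
  if name == "--cmake-args" then (specific ++ b.1, b.2.1, b.2.2)
  else if name == "--make-args" then (b.1, specific ++ b.2.1, b.2.2)
  else if name == "--catkin-make-args" then (b.1, b.2.1, specific ++ b.2.2)
  else b

-- loop body of 'for index, name in ordered_splitters'; state = (head_args, tail_args, cmake, make, catkin)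
def pvAstep (st : List String × List String × List String × List String × List String)
    (p : Int × String) : List String × List String × List String × List String × List String :=
  let q := split_arguments_py st.1 p.1
  let b := pvPrepend p.2 q.2.1 (st.2.2.1, st.2.2.2.1, st.2.2.2.2)
  (q.1, st.2.1 ++ q.2.2, b.1, b.2.1, b.2.2)

def extract_cmake_and_make_arguments_py (args : List String) (extract_catkin_make : Bool) :
    List String × Option (List String) × Option (List String) × Option (List String) :=
  let hc := !args.contains "--no-cmake-args"
  let hm := !args.contains "--no-make-args"
  let hk := (!args.contains "--no-catkin_make_args") && extract_catkin_make
  let ordered_splitters :=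
    ((PySem.List.enumerate args).filter (fun p => pvActive hc hm hk p.2)).reverse
  let st := ordered_splitters.foldl pvAstep (args, [], [], [], [])
  let args1 := st.1 ++ st.2.1
  let cmake_args := st.2.2.1
  let make_args := st.2.2.2.1
  let catkin_make_args := st.2.2.2.2
  let ac :=
    if hc then
      let implicit := args1.filter
        (fun a => PySem.Str.startswith a "-D" || PySem.Str.startswith a "-G")
      (args1.filter (fun a => !implicit.contains a), implicit ++ cmake_args)
    else (args1, cmake_args)
  let args2 := ac.1
  let cmake2 := ac.2
  let cmakeO := if (!args2.contains "--no-cmake-args") && cmake2.length == 0 then none else some cmake2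
  let makeO := if (!args2.contains "--no-make-args") && make_args.length == 0 then none else some make_args
  let catkinO := if (!args2.contains "--no-catkin-make-args") && catkin_make_args.length == 0 && extract_catkin_make
    then none else some catkin_make_args
  (args2, cmakeO, makeO, catkinO)

-- ===== PORT B =====
inductive PvDest
  | dhead | dcmake | dmake | dcatkin | dtail
deriving DecidableEq, Repr

structure PvSt where
  head : List String
  cmake : List String
  make : List String
  catkin : List String
  tails : List (List String)  -- post-'--' blocks, most recent window first
  dest : PvDest
  inWindow : Bool
deriving DecidableEq, Repr

def pvAppend (st : PvSt) (tok : String) : PvSt :=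
  match st.dest with
  | .dhead => { st with head := st.head ++ [tok] }
  | .dcmake => { st with cmake := st.cmake ++ [tok] }
  | .dmake => { st with make := st.make ++ [tok] }
  | .dcatkin => { st with catkin := st.catkin ++ [tok] }
  | .dtail => { st with tails := match st.tails with
                | [] => [[tok]]
                | b :: bs => (b ++ [tok]) :: bs }

def pvStep (hc hm hk : Bool) (st : PvSt) (tok : String) : PvSt :=
  if hc && tok == "--cmake-args" then { st with dest := .dcmake, inWindow := true }
  else if hm && tok == "--make-args" then { st with dest := .dmake, inWindow := true }
  else if hk && tok == "--catkin-make-args" then { st with dest := .dcatkin, inWindow := true }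
  else if tok == "--" && st.inWindow then
    { st with tails := [] :: st.tails, dest := .dtail, inWindow := false }
  else pvAppend st tok

def pvInit : PvSt := ⟨[], [], [], [], [], .dhead, false⟩

-- loop body of the keep/implicit partition pass
def pvPartStep (p : List String × List String) (a : String) : List String × List String :=
  if PySem.Str.startswith a "-D" || PySem.Str.startswith a "-G" then (p.1, p.2 ++ [a])
  else (p.1 ++ [a], p.2)

def extract_cmake_and_make_arguments_py_alt (args : List String) (extract_catkin_make : Bool) :
    List String × Option (List String) × Option (List String) × Option (List String) :=
  let hc := !args.contains "--no-cmake-args"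
  let hm := !args.contains "--no-make-args"
  let hk := (!args.contains "--no-catkin_make_args") && extract_catkin_make
  let st := args.foldl (pvStep hc hm hk) pvInit
  let args1 := st.head ++ st.tails.flatten
  let ac :=
    if hc then
      let ki := args1.foldl pvPartStep ([], [])
      (ki.1, ki.2 ++ st.cmake)
    else (args1, st.cmake)
  let args2 := ac.1
  let cmake2 := ac.2
  let cmakeO := if (!args2.contains "--no-cmake-args") && cmake2.isEmpty then none else some cmake2
  let makeO := if (!args2.contains "--no-make-args") && st.make.isEmpty then none else some st.make
  let catkinO := if (!args2.contains "--no-catkin-make-args") && st.catkin.isEmpty && extract_catkin_make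
    then none else some st.catkin
  (args2, cmakeO, makeO, catkinO)


-- ===== PRECONDITION & SPEC =====
def Spec_extract_cmake_and_make_arguments_py (args : List String) (extract_catkin_make : Bool) (out : List String × Option (List String) × Option (List String) × Option (List String)) : Prop := out = extract_cmake_and_make_arguments_py_alt args extract_catkin_make
instance (args : List String) (extract_catkin_make : Bool) (out : List String × Option (List String) × Option (List String) × Option (List String)) : Decidable (Spec_extract_cmake_and_make_arguments_py args extract_catkin_make out) := by unfold Spec_extract_cmake_and_make_arguments_py; infer_instance

-- ===== CLAIM (what is proved, stated in full; the proofs are below) =====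
def Claim_equal_extract_cmake_and_make_arguments_py : Prop := ∀ (args : List String) (extract_catkin_make : Bool), Dom_extract_cmake_and_make_arguments_py args extract_catkin_make → Spec_extract_cmake_and_make_arguments_py args extract_catkin_make (extract_cmake_and_make_arguments_py args extract_catkin_make)

-- ===== LEMMAS AND PROOFS =====

def pvAddTo (st : PvSt) (d : PvDest) (ws : List String) : PvSt :=
  match d with
  | .dhead => { st with head := st.head ++ ws }
  | .dcmake => { st with cmake := st.cmake ++ ws }
  | .dmake => { st with make := st.make ++ ws }
  | .dcatkin => { st with catkin := st.catkin ++ ws }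
  | .dtail => st

lemma pv_notActive (hc hm hk : Bool) (t : String) (h : pvActive hc hm hk t = false) :
    (hc && (t == "--cmake-args")) = false ∧ (hm && (t == "--make-args")) = false
      ∧ (hk && (t == "--catkin-make-args")) = false := by
  simp only [pvActive, Bool.or_eq_false_iff] at h
  exact ⟨h.1.1, h.1.2, h.2⟩

lemma pv_headScan (hc hm hk : Bool) (w : List String) : ∀ (st : PvSt),
    (∀ t ∈ w, pvActive hc hm hk t = false) →
    st.dest = .dhead → st.inWindow = false →
    w.foldl (pvStep hc hm hk) st = { st with head := st.head ++ w } := by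
  induction w with
  | nil => intro st _ _ _; simp
  | cons t w ih =>
    intro st hna hd hw
    obtain ⟨h1, h2, h3⟩ := pv_notActive hc hm hk t (hna t (by simp))
    simp only [List.foldl_cons, pvStep, h1, h2, h3, hw, Bool.and_false, Bool.false_eq_true,
      if_false, pvAppend, hd]
    rw [ih _ (fun u hu => hna u (by simp [hu])) (by simp) (by simp [hw])]
    simp

lemma pv_tailScan (hc hm hk : Bool) (w : List String) : ∀ (st : PvSt) (b : List String) (bs : List (List String)),
    (∀ t ∈ w, pvActive hc hm hk t = false) →
    st.dest = .dtail → st.inWindow = false → st.tails = b :: bs →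
    w.foldl (pvStep hc hm hk) st = { st with tails := (b ++ w) :: bs } := by
  induction w with
  | nil => intro st b bs _ _ _ ht; simp [← ht]
  | cons t w ih =>
    intro st b bs hna hd hw ht
    obtain ⟨h1, h2, h3⟩ := pv_notActive hc hm hk t (hna t (by simp))
    simp only [List.foldl_cons, pvStep, h1, h2, h3, hw, Bool.and_false, Bool.false_eq_true,
      if_false, pvAppend, hd, ht]
    rw [ih _ (b ++ [t]) bs (fun u hu => hna u (by simp [hu])) (by simp) (by simp [hw]) (by simp)]
    simp

lemma pvAddTo_nil (st : PvSt) (d : PvDest) : pvAddTo st d [] = st := by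
  cases d <;> simp [pvAddTo]

lemma pv_index?_nil : PySem.List.index? ([] : List String) "--" = none := by
  simp [PySem.List.index?_eq_idxOf?]

lemma pv_winScan (hc hm hk : Bool) (w : List String) : ∀ (st : PvSt),
    (∀ t ∈ w, pvActive hc hm hk t = false) →
    (st.dest = .dcmake ∨ st.dest = .dmake ∨ st.dest = .dcatkin) →
    st.inWindow = true →
    w.foldl (pvStep hc hm hk) st =
      (match PySem.List.index? w "--" with
       | none => pvAddTo st st.dest w
       | some j => { pvAddTo st st.dest (w.take j) with
                     tails := (w.drop (j + 1)) :: st.tails, dest := .dtail, inWindow := false }) := by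
  induction w with
  | nil =>
    intro st _ _ _
    simp only [List.foldl_nil, pv_index?_nil, pvAddTo_nil]
  | cons t w ih =>
    intro st hna hd hw
    obtain ⟨h1, h2, h3⟩ := pv_notActive hc hm hk t (hna t (by simp))
    by_cases hdash : t = "--"
    · subst hdash
      simp only [List.foldl_cons, pvStep, h1, h2, h3, hw, Bool.and_true, Bool.false_eq_true,
        if_false, beq_self_eq_true, if_true]
      rw [pv_tailScan hc hm hk w _ [] st.tails (fun u hu => hna u (by simp [hu])) (by simp) (by simp) (by simp)]
      simp only [PySem.List.index?_cons_self, List.take_zero, pvAddTo_nil, List.nil_append,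
        Nat.zero_add, List.drop_succ_cons, List.drop_zero]
    · have hne : (t == "--") = false := by simp [hdash]
      have hcons : PySem.List.index? (t :: w) "--" = (PySem.List.index? w "--").map (· + 1) :=
        PySem.List.index?_cons_of_ne w hdash
      simp only [List.foldl_cons, pvStep, h1, h2, h3, hne, Bool.false_and, Bool.false_eq_true, if_false]
      have hstep : pvAppend st t = pvAddTo st st.dest [t] := by
        rcases hd with h | h | h <;> simp [pvAppend, pvAddTo, h]
      rw [hstep]
      have hpres : (pvAddTo st st.dest [t]).dest = st.dest ∧ (pvAddTo st st.dest [t]).inWindow = st.inWindow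
          ∧ (pvAddTo st st.dest [t]).tails = st.tails := by
        rcases hd with h | h | h <;> simp [pvAddTo, h]
      rw [ih _ (fun u hu => hna u (by simp [hu])) (by rw [hpres.1]; exact hd) (by rw [hpres.2.1]; exact hw)]
      cases hj : PySem.List.index? w "--" with
      | none =>
        simp only [hcons, hj, Option.map_none]
        rw [hpres.1]
        rcases hd with h | h | h <;> simp [pvAddTo, h]
      | some j =>
        simp only [hcons, hj, Option.map_some]
        rw [hpres.1, hpres.2.2]
        rcases hd with h | h | h <;> simp [pvAddTo, h, List.take_succ_cons, List.drop_succ_cons]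
def pvSpecDash (w : List String) : List String :=
  match PySem.List.index? w "--" with
  | none => w
  | some j => w.take j

def pvTailDash (w : List String) : List String :=
  match PySem.List.index? w "--" with
  | none => []
  | some j => w.drop (j + 1)

lemma pv_split_at (xs w : List String) (s : String) :
    split_arguments_py (xs ++ s :: w) (xs.length : Int) = (xs, pvSpecDash w, pvTailDash w) := by
  have hone : ((xs.length : Int) + 1) = (((xs.length + 1 : Nat)) : Int) := by push_cast; ring
  have hsw : xs ++ s :: w = (xs ++ [s]) ++ w := by simp
  have hlen1 : xs.length + 1 = (xs ++ [s]).length := by simp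
  have hrest : PySem.List.slice (xs ++ s :: w) (some ((xs.length : Int) + 1)) none = w := by
    rw [hone, PySem.List.slice_from_natCast, hsw, hlen1, List.drop_left]
  have htake : PySem.List.slice (xs ++ s :: w) (some 0) (some (xs.length : Int)) = xs := by
    rw [PySem.List.slice_zero_start, PySem.List.slice_to_natCast, List.take_left]
  unfold split_arguments_py
  simp only [hrest, htake]
  cases hj : PySem.List.index? w "--" with
  | none => simp only [pvSpecDash, pvTailDash, hj]
  | some j =>
    have hnz : ((xs.length : Int) + 1 + (j : Int)) ≠ 0 := by
      have : (0:Int) ≤ (xs.length : Int) := Int.natCast_nonneg _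
      have : (0:Int) ≤ (j : Int) := Int.natCast_nonneg _
      omega
    have hspec : PySem.List.slice (xs ++ s :: w) (some ((xs.length : Int) + 1))
        (some ((xs.length : Int) + 1 + (j : Int))) = w.take j := by
      rw [hone, PySem.List.slice_natCast_add, hsw, hlen1, List.drop_left]
    have htail : PySem.List.slice (xs ++ s :: w) (some ((xs.length : Int) + 1 + (j : Int) + 1)) none
        = w.drop (j + 1) := by
      have : ((xs.length : Int) + 1 + (j : Int) + 1) = (((xs.length + 1 + (j + 1) : Nat)) : Int) := by
        push_cast; ring
      rw [this, PySem.List.slice_from_natCast, hsw,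
        show xs.length + 1 + (j + 1) = xs.length + 1 + (j + 1) from rfl, hlen1]
      exact List.drop_length_add_append (j + 1)
    simp only [hspec, htail, pvSpecDash, pvTailDash, hj, if_pos hnz]
lemma pv_shift (l : List (Int × String)) : ∀ (h0 t0 c0 m0 k0 : List String),
    l.foldl pvAstep (h0, t0, c0, m0, k0) =
      ((l.foldl pvAstep (h0, [], [], [], [])).1,
       t0 ++ (l.foldl pvAstep (h0, [], [], [], [])).2.1,
       (l.foldl pvAstep (h0, [], [], [], [])).2.2.1 ++ c0,
       (l.foldl pvAstep (h0, [], [], [], [])).2.2.2.1 ++ m0,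
       (l.foldl pvAstep (h0, [], [], [], [])).2.2.2.2 ++ k0) := by
  induction l with
  | nil => intros; simp
  | cons p l ih =>
    intro h0 t0 c0 m0 k0
    simp only [List.foldl_cons, pvAstep, pvPrepend, List.nil_append, List.append_nil]
    generalize split_arguments_py h0 p.1 = q
    split_ifs with hh1 hh2 hh3
    · rw [ih q.1 (t0 ++ q.2.2) (q.2.1 ++ c0) m0 k0, ih q.1 q.2.2 q.2.1 [] []]
      simp [List.append_assoc]
    · rw [ih q.1 (t0 ++ q.2.2) c0 (q.2.1 ++ m0) k0, ih q.1 q.2.2 [] q.2.1 []]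
      simp [List.append_assoc]
    · rw [ih q.1 (t0 ++ q.2.2) c0 m0 (q.2.1 ++ k0), ih q.1 q.2.2 [] [] q.2.1]
      simp [List.append_assoc]
    · rw [ih q.1 (t0 ++ q.2.2) c0 m0 k0, ih q.1 q.2.2 [] [] []]
      simp [List.append_assoc]

lemma pv_dec (act : String → Bool) : ∀ (args : List String) (L : List (Int × String)) (k : Int) (s : String),
    (PySem.List.enumerate args).filter (fun p => act p.2) = L ++ [(k, s)] →
    ∃ n : Nat, k = (n : Int) ∧ n < args.length ∧
      args = args.take n ++ s :: args.drop (n + 1) ∧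
      (∀ t ∈ args.drop (n + 1), act t = false) ∧ act s = true ∧
      (PySem.List.enumerate (args.take n)).filter (fun p => act p.2) = L := by
  intro args
  induction args using List.reverseRecOn with
  | nil => intro L k s h; simp [PySem.List.enumerate_nil] at h
  | append_singleton xs x ih =>
    intro L k s h
    rw [PySem.List.enumerate_append, List.filter_append] at h
    have hx1 : PySem.List.enumerate [x] (0 + (xs.length : Int)) = [((xs.length : Int), x)] := by
      simp [PySem.List.enumerate_cons, PySem.List.enumerate_nil]
    rw [hx1] at h
    cases hx : act x with
    | true =>
      rw [List.filter_cons, if_pos (by simpa using hx)] at h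
      simp only [List.filter_nil] at h
      obtain ⟨hL, hlast⟩ := List.append_inj' h (by simp)
      have hks : k = (xs.length : Int) ∧ s = x := by
        have := List.cons.injEq .. ▸ hlast
        constructor
        · exact (Prod.mk.injEq .. ▸ (List.cons_eq_cons.mp hlast).1).1.symm
        · exact (Prod.mk.injEq .. ▸ (List.cons_eq_cons.mp hlast).1).2.symm
      refine ⟨xs.length, hks.1, by simp, ?_, ?_, ?_, ?_⟩
      · rw [List.take_left, List.drop_length_add_append 1]
        simp [hks.2]
      · intro t ht
        rw [List.drop_length_add_append 1] at ht
        simp at ht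
      · rw [hks.2]; exact hx
      · rw [List.take_left, ← hL]
    | false =>
      rw [List.filter_cons, if_neg (by simp [hx])] at h
      simp only [List.filter_nil, List.append_nil] at h
      obtain ⟨n, hk, hn, hdec, hnoact, hacts, hfil⟩ := ih L k s h
      have hle : n ≤ xs.length := Nat.le_of_lt hn
      have hle1 : n + 1 ≤ xs.length := hn
      refine ⟨n, hk, by simp; omega, ?_, ?_, hacts, ?_⟩
      · rw [List.take_append_of_le_length hle, List.drop_append_of_le_length hle1]
        conv_lhs => rw [show xs ++ [x] = (xs.take n ++ s :: xs.drop (n+1)) ++ [x] from by rw [← hdec]]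
        simp
      · intro t ht
        rw [List.drop_append_of_le_length hle1] at ht
        rcases List.mem_append.mp ht with h1 | h1
        · exact hnoact t h1
        · simp at h1; subst h1; exact hx
      · rw [List.take_append_of_le_length hle]; exact hfil
def pvAfold (hc hm hk : Bool) (args : List String) :
    List String × List String × List String × List String × List String :=
  (((PySem.List.enumerate args).filter (fun p => pvActive hc hm hk p.2)).reverse).foldl
    pvAstep (args, [], [], [], [])

def pvBproj (st : PvSt) : List String × List String × List String × List String × List String :=
  (st.head, st.tails.flatten, st.cmake, st.make, st.catkin)

lemma pv_main (hc hm hk : Bool) : ∀ (N : Nat) (args : List String), args.length ≤ N →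
    pvAfold hc hm hk args = pvBproj (args.foldl (pvStep hc hm hk) pvInit) := by
  intro N
  induction N with
  | zero =>
    intro args hlen
    have h0 : args = [] := List.eq_nil_of_length_eq_zero (Nat.le_zero.mp hlen)
    subst h0; rfl
  | succ N ih =>
    intro args hlen
    by_cases hfe : (PySem.List.enumerate args).filter (fun p => pvActive hc hm hk p.2) = []
    · have hna : ∀ t ∈ args, pvActive hc hm hk t = false := by
        intro t ht
        have ht2 : t ∈ (PySem.List.enumerate args).map (·.2) := by
          rw [PySem.List.map_snd_enumerate]; exact ht
        obtain ⟨p, hp, hpt⟩ := List.mem_map.mp ht2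
        have := List.filter_eq_nil_iff.mp hfe p hp
        rw [← hpt]; simpa using this
      rw [pv_headScan hc hm hk args pvInit hna rfl rfl]
      simp [pvAfold, hfe, pvBproj, pvInit]
    · have hdecl : (PySem.List.enumerate args).filter (fun p => pvActive hc hm hk p.2) =
          ((PySem.List.enumerate args).filter (fun p => pvActive hc hm hk p.2)).dropLast ++
            [((PySem.List.enumerate args).filter (fun p => pvActive hc hm hk p.2)).getLast hfe] :=
        (List.dropLast_append_getLast hfe).symm
      set FE := (PySem.List.enumerate args).filter (fun p => pvActive hc hm hk p.2) with hFE
      set p := FE.getLast hfe with hp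
      obtain ⟨n, hkn, hn, hdecomp, hnoact, hacts, hfiltake⟩ :=
        pv_dec (fun t => pvActive hc hm hk t) args FE.dropLast p.1 p.2 hdecl
      set w := args.drop (n + 1) with hw
      have hlentake : (args.take n).length = n := by
        rw [List.length_take]; omega
      have hq0 := pv_split_at (args.take n) w p.2
      rw [hlentake] at hq0
      have hq : split_arguments_py args p.1 = (args.take n, pvSpecDash w, pvTailDash w) := by
        rw [hkn]
        conv_lhs => rw [hdecomp]
        exact hq0
      -- A side
      have hA : pvAfold hc hm hk args =
          FE.dropLast.reverse.foldl pvAstep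
            (args.take n, pvTailDash w,
              (pvPrepend p.2 (pvSpecDash w) ([], [], [])).1,
              (pvPrepend p.2 (pvSpecDash w) ([], [], [])).2.1,
              (pvPrepend p.2 (pvSpecDash w) ([], [], [])).2.2) := by
        have hdecl2 : FE = FE.dropLast ++ [p] := (List.dropLast_append_getLast hfe).symm
        unfold pvAfold
        rw [← hFE]
        conv_lhs => rw [hdecl2]
        rw [List.reverse_append, List.reverse_singleton, List.singleton_append, List.foldl_cons]
        simp only [pvAstep, hq, List.nil_append]
      have hr := ih (args.take n) (by omega)
      have hAr : FE.dropLast.reverse.foldl pvAstep (args.take n, [], [], [], []) =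
          pvBproj ((args.take n).foldl (pvStep hc hm hk) pvInit) := by
        rw [← hr]; unfold pvAfold; rw [hfiltake]
      rw [hA, pv_shift, hAr]
      -- B side
      conv_rhs => rw [hdecomp]
      rw [List.foldl_append, List.foldl_cons]
      set Bn := (args.take n).foldl (pvStep hc hm hk) pvInit with hBn
      have hstepcase :
          (pvStep hc hm hk Bn p.2 = { Bn with dest := .dcmake, inWindow := true } ∧ p.2 = "--cmake-args") ∨
          (pvStep hc hm hk Bn p.2 = { Bn with dest := .dmake, inWindow := true } ∧ p.2 = "--make-args") ∨
          (pvStep hc hm hk Bn p.2 = { Bn with dest := .dcatkin, inWindow := true } ∧ p.2 = "--catkin-make-args") := by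
        have h' := hacts
        simp only [pvActive, Bool.or_eq_true, Bool.and_eq_true, beq_iff_eq] at h'
        rcases h' with (⟨h1, h2⟩ | ⟨h1, h2⟩) | ⟨h1, h2⟩
        · left; exact ⟨by simp [pvStep, h1, h2], h2⟩
        · right; left
          refine ⟨?_, h2⟩
          simp [pvStep, h1, h2]
        · right; right
          refine ⟨?_, h2⟩
          simp [pvStep, h1, h2]
      rcases hstepcase with ⟨hst, hs⟩ | ⟨hst, hs⟩ | ⟨hst, hs⟩ <;>
      · rw [hst]
        rw [pv_winScan hc hm hk w _ hnoact (by simp) rfl]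
        cases hj : PySem.List.index? w "--" with
        | none =>
          rw [PySem.List.index?_eq_idxOf?] at hj
          simp [pvAddTo, pvBproj, pvPrepend, pvSpecDash, pvTailDash, hj, hs]
        | some j =>
          rw [PySem.List.index?_eq_idxOf?] at hj
          simp [pvAddTo, pvBproj, pvPrepend, pvSpecDash, pvTailDash, hj, hs]
lemma pv_part (l : List String) (k0 i0 : List String) :
    l.foldl pvPartStep (k0, i0) =
      (k0 ++ l.filter (fun a => !(PySem.Str.startswith a "-D" || PySem.Str.startswith a "-G")),
       i0 ++ l.filter (fun a => PySem.Str.startswith a "-D" || PySem.Str.startswith a "-G")) := by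
  induction l generalizing k0 i0 with
  | nil => simp
  | cons a l ih =>
    simp only [List.foldl_cons, List.filter_cons]
    cases h : (PySem.Str.startswith a "-D" || PySem.Str.startswith a "-G") with
    | true =>
      simp only [pvPartStep, h, Bool.not_true, if_true, Bool.false_eq_true, if_false, ih]
      simp [List.append_assoc]
    | false =>
      simp only [pvPartStep, h, Bool.not_false, if_true, Bool.false_eq_true, if_false, ih]
      simp [List.append_assoc]

lemma pv_filter_not_implicit (l : List String) :
    l.filter (fun a => !(l.filter (fun a => PySem.Str.startswith a "-D" || PySem.Str.startswith a "-G")).contains a) =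
      l.filter (fun a => !(PySem.Str.startswith a "-D" || PySem.Str.startswith a "-G")) := by
  apply List.filter_congr
  intro a ha
  have hmem : (l.filter (fun a => PySem.Str.startswith a "-D" || PySem.Str.startswith a "-G")).contains a
      = (PySem.Str.startswith a "-D" || PySem.Str.startswith a "-G") := by
    cases h : (PySem.Str.startswith a "-D" || PySem.Str.startswith a "-G") with
    | true =>
      have : a ∈ l.filter (fun a => PySem.Str.startswith a "-D" || PySem.Str.startswith a "-G") :=
        List.mem_filter.mpr ⟨ha, h⟩
      simpa using this
    | false =>
      have : a ∉ l.filter (fun a => PySem.Str.startswith a "-D" || PySem.Str.startswith a "-G") := by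
        intro hmem
        have := (List.mem_filter.mp hmem).2
        rw [h] at this
        exact Bool.false_ne_true this
      simpa using this
  rw [hmem]

lemma pv_lenzero {α : Type} (l : List α) : (l.length == 0) = l.isEmpty := by cases l <;> rfl

lemma pv_ports_eq (args : List String) (e : Bool) :
    extract_cmake_and_make_arguments_py args e = extract_cmake_and_make_arguments_py_alt args e := by
  unfold extract_cmake_and_make_arguments_py extract_cmake_and_make_arguments_py_alt
  have hmain := pv_main (!args.contains "--no-cmake-args") (!args.contains "--no-make-args")
      ((!args.contains "--no-catkin_make_args") && e) args.length args le_rfl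
  unfold pvAfold pvBproj at hmain
  simp only [hmain]
  set st := args.foldl (pvStep (!args.contains "--no-cmake-args") (!args.contains "--no-make-args")
      ((!args.contains "--no-catkin_make_args") && e)) pvInit with hst
  by_cases hc : (!args.contains "--no-cmake-args") = true
  · simp only [hc, if_true, pv_part, pv_filter_not_implicit, List.nil_append, pv_lenzero]
  · simp only [Bool.not_eq_true] at hc
    simp only [hc, Bool.false_eq_true, if_false, pv_lenzero]

-- ===== VERDICT (by name: the statement is the Claim_ definition above) =====
theorem extract_cmake_and_make_arguments_py_spec : Claim_equal_extract_cmake_and_make_arguments_py := by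
  intro args extract_catkin_make _
  unfold Spec_extract_cmake_and_make_arguments_py
  exact pv_ports_eq args extract_catkin_make
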